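-- pv_equiv track=rewrite | github.com/esc/numba-rvsdg-talk | assets/transformed/early_exit.py | transformed_early_exit
-- ===== SOURCE A (Python) =====
-- def transformed_early_exit(a: int) -> int:
--     c = 0
--     __scfg_loop_cont__ = True
--     while __scfg_loop_cont__:
--         if c < 10:
--             c += 3
--             if c > a:
--                 __scfg_exit_var_0__ = 1
--                 __scfg_backedge_var_0__ = 1
--             else:
--                 __scfg_backedge_var_0__ = 0
--                 __scfg_exit_var_0__ = -1
--         else:
--             __scfg_exit_var_0__ = 0
--             __scfg_backedge_var_0__ = 1
--         __scfg_loop_cont__ = not __scfg_backedge_var_0__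
--     if __scfg_exit_var_0__ in (0,):
--         __scfg_return_value__ = c
--     else:
--         __scfg_return_value__ = c + 1
--     return __scfg_return_value__
-- ===== SOURCE B (Python) =====
-- def transformed_early_exit(a: int) -> int:
--     # closed form: loop checkpoints are c = 3, 6, 9, 12; return c+1 at the
--     # first checkpoint strictly greater than a, else 12.
--     if a < 3:
--         return 4
--     elif a < 6:
--         return 7
--     elif a < 9:
--         return 10
--     elif a < 12:
--         return 13
--     else:
--         return 12
-- ===== Notes on version B (the rewrite author's own statement) =====
-- stated objective: simpler
-- what changed: Replaced the state-machine while-loop (flag variables, backedge/exit encodings) with a direct closed-form case analysis over the four checkpoints c=3,6,9,12 the loop can reach.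
import Mathlib
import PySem

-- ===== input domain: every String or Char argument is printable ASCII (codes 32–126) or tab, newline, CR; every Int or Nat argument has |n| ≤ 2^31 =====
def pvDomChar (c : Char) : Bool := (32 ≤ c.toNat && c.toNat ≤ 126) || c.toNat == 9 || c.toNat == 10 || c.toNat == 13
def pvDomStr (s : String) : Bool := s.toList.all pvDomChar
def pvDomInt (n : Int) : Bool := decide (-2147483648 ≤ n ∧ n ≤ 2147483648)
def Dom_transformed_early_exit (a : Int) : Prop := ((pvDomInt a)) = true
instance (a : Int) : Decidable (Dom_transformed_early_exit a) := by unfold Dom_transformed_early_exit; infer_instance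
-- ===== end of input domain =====

-- B replaces A's flag-driven state-machine loop by a closed-form case analysis
-- over the four checkpoints c = 3, 6, 9, 12 (objective: simpler).

-- ===== PORT A =====
-- the while loop: state is c; returns (final c, __scfg_exit_var_0__)
def transformedEarlyExitLoop (a : Int) (c : Int) : Int × Int :=
  if c < 10 then
    let c' := c + 3
    if c' > a then (c', 1)      -- exit 1, backedge 1: loop stops
    else transformedEarlyExitLoop a c'   -- exit -1, backedge 0: loop continues
  else (c, 0)                   -- exit 0, backedge 1: loop stops
termination_by (10 - c).toNat
decreasing_by omega

def transformed_early_exit (a : Int) : Int :=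
  let r := transformedEarlyExitLoop a 0
  if r.2 = 0 then r.1 else r.1 + 1

-- ===== PORT B =====
def transformed_early_exit_alt (a : Int) : Int :=
  if a < 3 then 4
  else if a < 6 then 7
  else if a < 9 then 10
  else if a < 12 then 13
  else 12

-- ===== PRECONDITION & SPEC =====
def Spec_transformed_early_exit (a : Int) (out : Int) : Prop := out = transformed_early_exit_alt a
instance (a : Int) (out : Int) : Decidable (Spec_transformed_early_exit a out) := by unfold Spec_transformed_early_exit; infer_instance

-- ===== CLAIM (what is proved, stated in full; the proofs are below) =====
def Claim_equal_transformed_early_exit : Prop := ∀ (a : Int), Dom_transformed_early_exit a → Spec_transformed_early_exit a (transformed_early_exit a)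

-- ===== LEMMAS AND PROOFS =====
theorem loop_unfold (a c : Int) :
    transformedEarlyExitLoop a c =
      if c < 10 then
        (if c + 3 > a then (c + 3, 1) else transformedEarlyExitLoop a (c + 3))
      else (c, 0) := by
  rw [transformedEarlyExitLoop]

-- ===== VERDICT (by name: the statement is the Claim_ definition above) =====
theorem transformed_early_exit_spec : Claim_equal_transformed_early_exit := by
  intro a _
  unfold Spec_transformed_early_exit transformed_early_exit transformed_early_exit_alt
  rw [loop_unfold, loop_unfold, loop_unfold, loop_unfold, loop_unfold]
  split_ifs <;> simp_all
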